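-- pv_equiv track=rewrite | github.com/Sangioo/Ingegneria-Infomatica | Introduzione-alla-programmazione/Dispense/LabPython06/A_Ex7.py | A_Ex7
-- ===== SOURCE A (Python) =====
-- def A_Ex7(l):
--     ris = []
--     for s in l:
--         max = 0
--         maxC = ''
--         for c in s:
--             if s.count(c) > max or (s.count(c) == max and ord(c) < ord(maxC)):
--                 max = s.count(c)
--                 maxC = c
--         ris.append(maxC)
--
--     return tuple(ris)
-- ===== SOURCE B (Python) =====
-- def A_Ex7(l):
--     ris = []
--     for s in l:
--         best = ''
--         bestCount = 0
--         chars = sorted(s)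
--         while chars:
--             run = 1
--             while run < len(chars) and chars[run] == chars[0]:
--                 run += 1
--             if run > bestCount:
--                 bestCount = run
--                 best = chars[0]
--             chars = chars[run:]
--         ris.append(best)
--     return tuple(ris)
-- ===== Notes on version B (the rewrite author's own statement) =====
-- stated objective: alternative
-- what changed: Replaces A's repeated s.count scan per character (quadratic per string, with an explicit ordinal tie-break) by sort-then-run-length: sort each string, sweep maximal runs of equal characters, and keep the first strictly longer run so that ascending order resolves ties to the smallest ordinal.
import Mathlib
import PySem

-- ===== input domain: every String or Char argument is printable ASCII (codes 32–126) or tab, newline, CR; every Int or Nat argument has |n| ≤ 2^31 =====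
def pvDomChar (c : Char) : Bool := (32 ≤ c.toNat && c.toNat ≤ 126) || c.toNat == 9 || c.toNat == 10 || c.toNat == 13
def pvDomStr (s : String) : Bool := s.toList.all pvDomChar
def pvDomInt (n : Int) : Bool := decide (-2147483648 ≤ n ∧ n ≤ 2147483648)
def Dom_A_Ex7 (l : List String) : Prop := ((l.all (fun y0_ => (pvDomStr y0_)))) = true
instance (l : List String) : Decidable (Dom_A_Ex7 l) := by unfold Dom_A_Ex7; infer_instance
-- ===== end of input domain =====

-- B replaces A's repeated s.count scan per character by sort-then-run-length with a strict '>' update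
-- (ascending order makes ties resolve to the smallest ordinal); alternative decomposition, same results.

-- ===== PORT A =====
-- ord(maxC): exact for the one-char strings A stores in maxC; for maxC = '' Python never evaluates
-- ord ('or' short-circuits: count > 0 holds for every c of s while max = 0), so the default 0 is never relevant.
def pyOrd (s : String) : Int :=
  match s.toList with
  | [c] => (c.toNat : Int)
  | _ => 0

def aBest (s : List Char) : Int × String :=
  s.foldl (fun st c =>
    if ((s.count c : Nat) : Int) > st.1 ∨ (((s.count c : Nat) : Int) = st.1 ∧ (c.toNat : Int) < pyOrd st.2)
    then (((s.count c : Nat) : Int), String.ofList [c]) else st)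
    (0, "")

def A_Ex7 (l : List String) : List String :=
  l.foldl (fun ris s => ris ++ [(aBest s.toList).2]) []

-- ===== PORT B =====
-- 'while chars:' run-length sweep of the sorted list: run = 1 + length of the equal prefix of the tail
-- (the inner 'while chars[run] == chars[0]' scan), and chars = chars[run:] drops exactly that run.
def bLoop (cs : List Char) (st : Int × String) : Int × String :=
  match cs with
  | [] => st
  | c :: rest =>
    let run : Int := (1 + (rest.takeWhile (fun x => x == c)).length : Nat)
    bLoop (rest.dropWhile (fun x => x == c)) (if run > st.1 then (run, String.ofList [c]) else st)
termination_by cs.length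
decreasing_by
  exact Nat.lt_succ_of_le (List.length_dropWhile_le _ _)

def A_Ex7_alt (l : List String) : List String :=
  l.foldl (fun ris s => ris ++ [(bLoop (PySem.List.sorted s.toList (fun c => c) false) (0, "")).2]) []

-- ===== PRECONDITION & SPEC =====
def Spec_A_Ex7 (l : List String) (out : List String) : Prop := out = A_Ex7_alt l
instance (l : List String) (out : List String) : Decidable (Spec_A_Ex7 l out) := by unfold Spec_A_Ex7; infer_instance

-- ===== CLAIM (what is proved, stated in full; the proofs are below) =====
def Claim_equal_A_Ex7 : Prop := ∀ (l : List String), Dom_A_Ex7 l → Spec_A_Ex7 l (A_Ex7 l)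

-- ===== LEMMAS AND PROOFS =====

-- pvKey cs c encodes the pair (count of c in cs, -ordinal of c) lexicographically in one integer
def pvKey (cs : List Char) (c : Char) : Int := (cs.count c : Nat) * 4294967296 + (4294967295 - (c.toNat : Int))

theorem pvOrd_lt (c : Char) : c.toNat < 4294967296 := by
  have h : c.val.toNat < 4294967296 := c.val.toNat_lt_size
  exact h

theorem pyOrd_mk (m : Char) : pyOrd (String.ofList [m]) = (m.toNat : Int) := by
  simp [pyOrd]

theorem pvCond_iff (cs : List Char) (c m : Char) :
    (((cs.count c : Nat) : Int) > ((cs.count m : Nat) : Int)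
      ∨ (((cs.count c : Nat) : Int) = ((cs.count m : Nat) : Int) ∧ (c.toNat : Int) < (m.toNat : Int)))
      ↔ pvKey cs m < pvKey cs c := by
  have h1 := pvOrd_lt c
  have h2 := pvOrd_lt m
  unfold pvKey
  omega

theorem pvKey_le_of (cs : List Char) (x r : Char)
    (h : cs.count x < cs.count r ∨ (cs.count x = cs.count r ∧ r.toNat ≤ x.toNat)) :
    pvKey cs x ≤ pvKey cs r := by
  have h1 := pvOrd_lt x
  have h2 := pvOrd_lt r
  unfold pvKey
  omega

theorem pvKey_inj {cs : List Char} {x r : Char} (h : pvKey cs x = pvKey cs r) : x = r := by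
  have h1 := pvOrd_lt x
  have h2 := pvOrd_lt r
  unfold pvKey at h
  have hn : x.toNat = r.toNat := by omega
  exact Char.ext (UInt32.toNat_inj.mp hn)

-- A-side invariant: the fold keeps the key-maximal character seen so far
theorem pvAuxA (cs : List Char) (rem : List Char) : ∀ (m : Char),
    ∃ r, (rem.foldl (fun st c =>
        if ((cs.count c : Nat) : Int) > st.1 ∨ (((cs.count c : Nat) : Int) = st.1 ∧ (c.toNat : Int) < pyOrd st.2)
        then (((cs.count c : Nat) : Int), String.ofList [c]) else st)
        (((cs.count m : Nat) : Int), String.ofList [m])) = (((cs.count r : Nat) : Int), String.ofList [r])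
      ∧ (r = m ∨ r ∈ rem) ∧ pvKey cs m ≤ pvKey cs r ∧ ∀ x ∈ rem, pvKey cs x ≤ pvKey cs r := by
  induction rem with
  | nil => intro m; exact ⟨m, rfl, Or.inl rfl, le_refl _, by simp⟩
  | cons c rest ih =>
    intro m
    simp only [List.foldl_cons, pyOrd_mk]
    by_cases hc : (((cs.count c : Nat) : Int) > ((cs.count m : Nat) : Int)
        ∨ (((cs.count c : Nat) : Int) = ((cs.count m : Nat) : Int) ∧ (c.toNat : Int) < (m.toNat : Int)))
    · rw [if_pos hc]
      obtain ⟨r, heq, hmem, hle, hall⟩ := ih c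
      have hkey : pvKey cs m < pvKey cs c := (pvCond_iff cs c m).mp hc
      refine ⟨r, heq, ?_, le_of_lt (lt_of_lt_of_le hkey hle), ?_⟩
      · rcases hmem with h | h
        · exact Or.inr (List.mem_cons.mpr (Or.inl h))
        · exact Or.inr (List.mem_cons_of_mem _ h)
      · intro x hx
        rcases List.mem_cons.mp hx with h | h
        · exact h ▸ hle
        · exact hall x h
    · rw [if_neg hc]
      obtain ⟨r, heq, hmem, hle, hall⟩ := ih m
      have hkey : pvKey cs c ≤ pvKey cs m := by
        by_contra hlt
        exact hc ((pvCond_iff cs c m).mpr (lt_of_not_ge hlt))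
      refine ⟨r, heq, ?_, hle, ?_⟩
      · rcases hmem with h | h
        · exact Or.inl h
        · exact Or.inr (List.mem_cons_of_mem _ h)
      · intro x hx
        rcases List.mem_cons.mp hx with h | h
        · exact h ▸ le_trans hkey hle
        · exact hall x h

-- A's answer on a nonempty string: a key-maximal character of the string
theorem pvA_spec (cs : List Char) (c0 : Char) (rest : List Char) (h : cs = c0 :: rest) :
    ∃ r, (aBest cs).2 = String.ofList [r] ∧ r ∈ cs ∧ ∀ x ∈ cs, pvKey cs x ≤ pvKey cs r := by
  subst h
  have hpos : (0 : Int) < (((c0 :: rest).count c0 : Nat) : Int) := by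
    exact_mod_cast List.count_pos_iff.mpr List.mem_cons_self
  obtain ⟨r, heq, hmem, hle, hall⟩ := pvAuxA (c0 :: rest) rest c0
  refine ⟨r, ?_, ?_, ?_⟩
  · unfold aBest
    rw [List.foldl_cons]
    rw [if_pos (Or.inl hpos)]
    rw [heq]
  · rcases hmem with h' | h'
    · exact h' ▸ List.mem_cons_self
    · exact List.mem_cons_of_mem _ h'
  · intro x hx
    rcases List.mem_cons.mp hx with h' | h'
    · subst h'; exact hle
    · exact hall x h'

-- run-length decomposition used to reason about bLoop
def runsOf (cs : List Char) : List (Char × Int) :=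
  match cs with
  | [] => []
  | c :: rest =>
    (c, ((1 + (rest.takeWhile (fun x => x == c)).length : Nat) : Int)) ::
      runsOf (rest.dropWhile (fun x => x == c))
termination_by cs.length
decreasing_by
  exact Nat.lt_succ_of_le (List.length_dropWhile_le _ _)

theorem bLoop_eq_foldl_runsOf (cs : List Char) : ∀ (st : Int × String),
    bLoop cs st = (runsOf cs).foldl
      (fun st p => if p.2 > st.1 then (p.2, String.ofList [p.1]) else st) st := by
  induction hn : cs.length using Nat.strong_induction_on generalizing cs with
  | _ n ih =>
    intro st
    match cs with
    | [] => simp [bLoop, runsOf]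
    | c :: rest =>
      rw [bLoop, runsOf]
      simp only [List.foldl_cons]
      exact ih _ (hn ▸ Nat.lt_succ_of_le (List.length_dropWhile_le _ _)) _ rfl _

theorem pvSorted_tail {c : Char} {rest : List Char} (h : (c :: rest).Pairwise (· ≤ ·)) :
    rest.Pairwise (· ≤ ·) := (List.pairwise_cons.mp h).2

theorem pvNotMem_drop {c : Char} {rest : List Char}
    (hle : ∀ x ∈ rest, c ≤ x) (hs : rest.Pairwise (· ≤ ·)) :
    c ∉ rest.dropWhile (fun x => x == c) := by
  induction rest with
  | nil => simp
  | cons y ys ih =>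
    by_cases hy : y = c
    · subst hy
      rw [List.dropWhile_cons_of_pos (by simp)]
      exact ih (fun x hx => hle x (List.mem_cons_of_mem _ hx)) (pvSorted_tail hs)
    · rw [List.dropWhile_cons_of_neg (by simp [hy])]
      intro hmem
      rcases List.mem_cons.mp hmem with h' | h'
      · exact hy h'.symm
      · have h1 : c ≤ y := hle y List.mem_cons_self
        have h2 : y ≤ c := (List.pairwise_cons.mp hs).1 c h'
        exact hy (le_antisymm h2 h1)

theorem pvTake_all_eq {c : Char} (rest : List Char) :
    ∀ x ∈ rest.takeWhile (fun x => x == c), x = c := by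
  intro x hx
  have := List.mem_takeWhile_imp hx
  simpa using this

-- every entry of runsOf on a sorted list is (character, its count); the entries' chars are increasing
theorem pvRuns_spec (cs : List Char) :
    cs.Pairwise (· ≤ ·) →
    (∀ p ∈ runsOf cs, p.1 ∈ cs ∧ p.2 = ((cs.count p.1 : Nat) : Int))
    ∧ (∀ x ∈ cs, ∃ k, (x, k) ∈ runsOf cs)
    ∧ (runsOf cs).Pairwise (fun p q => p.1 < q.1) := by
  induction hn : cs.length using Nat.strong_induction_on generalizing cs with
  | _ n ih =>
    intro hsort
    match cs with
    | [] => exact ⟨by simp [runsOf], by simp, by simp [runsOf]⟩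
    | c :: rest =>
      have hle : ∀ x ∈ rest, c ≤ x := fun x hx => (List.pairwise_cons.mp hsort).1 x hx
      have hst : rest.Pairwise (· ≤ ·) := pvSorted_tail hsort
      set t := rest.takeWhile (fun x => x == c) with ht
      set d := rest.dropWhile (fun x => x == c) with hd
      have hsplit : rest = t ++ d := (List.takeWhile_append_dropWhile).symm
      have htc : ∀ x ∈ t, x = c := pvTake_all_eq rest
      have hcd : c ∉ d := pvNotMem_drop hle hst
      have hdsub : ∀ x ∈ d, x ∈ rest := fun x hx => hsplit ▸ List.mem_append_right _ hx
      have hdsort : d.Pairwise (· ≤ ·) := by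
        rw [hsplit] at hst
        exact (List.pairwise_append.mp hst).2.1
      have hdlen : d.length < n := hn ▸ Nat.lt_succ_of_le (List.length_dropWhile_le _ _)
      obtain ⟨ih1, ih2, ih3⟩ := ih d.length hdlen d rfl hdsort
      have hcount_c : (c :: rest).count c = 1 + t.length := by
        rw [hsplit, List.count_cons_self, List.count_append]
        have h1 : t.count c = t.length := by
          rw [List.count_eq_length.mpr]
          intro x hx
          exact ((htc x hx).symm ▸ rfl)
        have h2 : d.count c = 0 := List.count_eq_zero.mpr hcd
        omega
      have hcount_d : ∀ x ∈ d, (c :: rest).count x = d.count x := by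
        intro x hx
        have hxc : x ≠ c := fun he => hcd (he ▸ hx)
        have h0 : t.count x = 0 := by
          rw [List.count_eq_zero]
          intro hxt
          exact hxc (htc x hxt)
        rw [hsplit]
        simp [List.count_append, h0, Ne.symm hxc]
      have hgt : ∀ x ∈ d, c < x := by
        intro x hx
        rcases lt_or_eq_of_le (hle x (hdsub x hx)) with h | h
        · exact h
        · exact absurd (h ▸ hx) hcd
      refine ⟨?_, ?_, ?_⟩
      · intro p hp
        rw [runsOf] at hp
        rcases List.mem_cons.mp hp with h' | h'
        · subst h'
          refine ⟨List.mem_cons_self, ?_⟩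
          rw [hcount_c]
        · obtain ⟨hmem, hcnt⟩ := ih1 p h'
          refine ⟨List.mem_cons_of_mem _ (hdsub _ hmem), ?_⟩
          rw [hcnt, hcount_d _ hmem]
      · intro x hx
        rcases List.mem_cons.mp hx with h' | h'
        · subst h'
          exact ⟨_, by rw [runsOf]; exact List.mem_cons_self⟩
        · rw [hsplit] at h'
          rcases List.mem_append.mp h' with h'' | h''
          · exact (htc x h'') ▸ ⟨_, by rw [runsOf]; exact List.mem_cons_self⟩
          · obtain ⟨k, hk⟩ := ih2 x h''
            exact ⟨k, by rw [runsOf]; exact List.mem_cons_of_mem _ hk⟩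
      · rw [runsOf, List.pairwise_cons]
        refine ⟨?_, ih3⟩
        intro q hq
        exact hgt q.1 (ih1 q hq).1

-- B-side invariant for the fold over the runs: strict '>' keeps the first maximal run
theorem pvAuxB (ps : List (Char × Int)) : ∀ (r0 : Char) (k0 : Int),
    (∀ p ∈ ps, r0 < p.1) → ps.Pairwise (fun p q => p.1 < q.1) →
    ∃ r' k', (ps.foldl (fun st p => if p.2 > st.1 then (p.2, String.ofList [p.1]) else st) (k0, String.ofList [r0]))
        = (k', String.ofList [r'])
      ∧ ((r' = r0 ∧ k' = k0) ∨ (r', k') ∈ ps)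
      ∧ k0 ≤ k' ∧ (k' = k0 → r' = r0)
      ∧ ∀ p ∈ ps, p.2 < k' ∨ (p.2 = k' ∧ r' ≤ p.1) := by
  induction ps with
  | nil => intro r0 k0 _ _; exact ⟨r0, k0, rfl, Or.inl ⟨rfl, rfl⟩, le_refl _, fun _ => rfl, by simp⟩
  | cons p rest ih =>
    intro r0 k0 hlt hpw
    obtain ⟨c, k⟩ := p
    have hrestlt : ∀ q ∈ rest, c < q.1 := fun q hq => (List.pairwise_cons.mp hpw).1 q hq
    have hrestpw : rest.Pairwise (fun p q => p.1 < q.1) := (List.pairwise_cons.mp hpw).2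
    simp only [List.foldl_cons]
    by_cases hk : k > k0
    · rw [if_pos hk]
      obtain ⟨r', k', heq, hmem, hge, htie, hall⟩ := ih c k hrestlt hrestpw
      refine ⟨r', k', heq, ?_, le_of_lt (lt_of_lt_of_le hk hge), ?_, ?_⟩
      · rcases hmem with ⟨h1, h2⟩ | h
        · exact Or.inr (List.mem_cons.mpr (Or.inl (by rw [h1, h2])))
        · exact Or.inr (List.mem_cons_of_mem _ h)
      · intro he; omega
      · intro q hq
        rcases List.mem_cons.mp hq with h' | h'
        · subst h'
          rcases lt_or_eq_of_le hge with h | h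
          · exact Or.inl h
          · exact Or.inr ⟨h, le_of_eq (htie h.symm)⟩
        · exact hall q h'
    · rw [if_neg hk]
      have hr0rest : ∀ q ∈ rest, r0 < q.1 :=
        fun q hq => lt_trans (hlt (c, k) List.mem_cons_self) (hrestlt q hq)
      obtain ⟨r', k', heq, hmem, hge, htie, hall⟩ := ih r0 k0 hr0rest hrestpw
      refine ⟨r', k', heq, ?_, hge, htie, ?_⟩
      · rcases hmem with h | h
        · exact Or.inl h
        · exact Or.inr (List.mem_cons_of_mem _ h)
      · intro q hq
        rcases List.mem_cons.mp hq with h' | h'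
        · subst h'
          by_cases he : k = k'
          · have hk0 : k' = k0 := by omega
            have hr : r' = r0 := htie hk0
            exact Or.inr ⟨he, le_of_lt (hr ▸ hlt (c, k) List.mem_cons_self)⟩
          · exact Or.inl (by omega)
        · exact hall q h'

-- B's answer on a nonempty string: also a key-maximal character
theorem pvB_spec (cs : List Char) (hne : cs ≠ []) :
    ∃ r, (bLoop (PySem.List.sorted cs (fun c => c) false) (0, "")).2 = String.ofList [r]
      ∧ r ∈ cs ∧ ∀ x ∈ cs, pvKey cs x ≤ pvKey cs r := by
  have hperm : (PySem.List.sorted cs (fun c => c) false).Perm cs :=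
    PySem.List.sorted_perm cs (fun c => c) false
  have hsort : (PySem.List.sorted cs (fun c => c) false).Pairwise (· ≤ ·) := by
    simpa using PySem.List.sorted_pairwise cs (fun c => c)
  have hsne : PySem.List.sorted cs (fun c => c) false ≠ [] := by
    intro h
    have : cs = [] := (h ▸ hperm.symm).eq_nil
    exact hne this
  obtain ⟨c1, rest, hssm⟩ := List.exists_cons_of_ne_nil hsne
  rw [hssm] at hperm hsort ⊢
  have hcnt : ∀ y : Char, (c1 :: rest).count y = cs.count y := fun y => hperm.count_eq y
  obtain ⟨h1, h2, h3⟩ := pvRuns_spec (c1 :: rest) hsort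
  rw [bLoop_eq_foldl_runsOf]
  rw [runsOf] at h1 h2 h3 ⊢
  set k1 : Int := ((1 + (rest.takeWhile (fun x => x == c1)).length : Nat) : Int) with hk1
  set ps := runsOf (rest.dropWhile (fun x => x == c1)) with hps
  have hk1pos : (0 : Int) < k1 := by rw [hk1]; positivity
  simp only [List.foldl_cons]
  rw [if_pos hk1pos]
  have hpslt : ∀ p ∈ ps, c1 < p.1 := fun p hp => (List.pairwise_cons.mp h3).1 p hp
  have hpspw : ps.Pairwise (fun p q => p.1 < q.1) := (List.pairwise_cons.mp h3).2
  obtain ⟨r', k', heq, hmem, hge, htie, hall⟩ := pvAuxB ps c1 k1 hpslt hpspw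
  have hmem' : (r', k') ∈ (c1, k1) :: ps := by
    rcases hmem with ⟨ha, hb⟩ | h
    · exact List.mem_cons.mpr (Or.inl (by rw [ha, hb]))
    · exact List.mem_cons_of_mem _ h
  obtain ⟨hr'ss, hk'⟩ := h1 (r', k') hmem'
  have hcntr : k' = ((cs.count r' : Nat) : Int) := by
    have h := hk'
    simp only at h
    rw [h, hcnt r']
  refine ⟨r', by rw [heq], hperm.mem_iff.mp hr'ss, ?_⟩
  intro x hx
  have hxss : x ∈ c1 :: rest := hperm.mem_iff.mpr hx
  obtain ⟨kx, hkx⟩ := h2 x hxss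
  obtain ⟨_, hkxval⟩ := h1 (x, kx) hkx
  have hcntx : kx = ((cs.count x : Nat) : Int) := by
    have h := hkxval
    simp only at h
    rw [h, hcnt x]
  rcases List.mem_cons.mp hkx with h' | h'
  · -- x is the first run's character c1
    have hxc1 : x = c1 := congrArg Prod.fst h'
    have hkxk1 : kx = k1 := congrArg Prod.snd h'
    rcases lt_or_eq_of_le hge with h | h
    · refine pvKey_le_of cs x r' (Or.inl ?_)
      have hlt : kx < k' := hkxk1 ▸ h
      rw [hcntx, hcntr] at hlt
      exact_mod_cast hlt
    · have hrx : r' = x := hxc1 ▸ htie h.symm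
      exact le_of_eq (by rw [hrx])
  · rcases hall (x, kx) h' with h | ⟨hkk, hlexx⟩
    · refine pvKey_le_of cs x r' (Or.inl ?_)
      have hlt : kx < k' := h
      rw [hcntx, hcntr] at hlt
      exact_mod_cast hlt
    · refine pvKey_le_of cs x r' (Or.inr ⟨?_, ?_⟩)
      · have hee : kx = k' := hkk
        rw [hcntx, hcntr] at hee
        exact_mod_cast hee
      · exact hlexx

theorem pvPerString (cs : List Char) :
    (aBest cs).2 = (bLoop (PySem.List.sorted cs (fun c => c) false) (0, "")).2 := by
  match hcs : cs with
  | [] =>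
    have h : PySem.List.sorted ([] : List Char) (fun c => c) false = [] := by
      simp [PySem.List.sorted_eq_nil_iff]
    rw [h, bLoop]
    rfl
  | c0 :: rest =>
    obtain ⟨rA, hA2, hAmem, hAmax⟩ := pvA_spec (c0 :: rest) c0 rest rfl
    obtain ⟨rB, hB2, hBmem, hBmax⟩ := pvB_spec (c0 :: rest) (by simp)
    have h1 : pvKey (c0 :: rest) rA ≤ pvKey (c0 :: rest) rB := hBmax rA hAmem
    have h2 : pvKey (c0 :: rest) rB ≤ pvKey (c0 :: rest) rA := hAmax rB hBmem
    have : rA = rB := pvKey_inj (le_antisymm h1 h2)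
    rw [hA2, hB2, this]

theorem pvAll (l : List String) : A_Ex7 l = A_Ex7_alt l := by
  unfold A_Ex7 A_Ex7_alt
  induction l using List.reverseRecOn with
  | nil => rfl
  | append_singleton xs s ih =>
    simp only [List.foldl_append, List.foldl_cons, List.foldl_nil]
    rw [ih, pvPerString]

-- ===== VERDICT (by name: the statement is the Claim_ definition above) =====
theorem A_Ex7_spec : Claim_equal_A_Ex7 := by
  intro l _
  unfold Spec_A_Ex7
  exact pvAll l
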